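-- pv_equiv track=rewrite | github.com/nga-27/fantasy-football-scratchpad | libs/xlsx_utils.py | xlsx_patch_rows
-- ===== SOURCE A (Python) =====
-- def xlsx_patch_rows(dataset: dict, patch_obj: dict, num_added_rows: int) -> dict:
--     """xlsx_path_rows
--
--     Helper function that fills in empty cells in columns not in patch_obj for num_added_rows. This
--     function is helpful in keeping dataframe columns the same size with out tedious .append("")
--     clauses everywhere in the code.
--
--     NOTE: patch_obj only applies to first row of num_added_rows, so if num_added_rows > 1, then
--     the rest of the rows will be backfilled with empty cells for each column.
--
--     Args:
--         dataset (dict): subset of xlsx_dict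
--         patch_obj (dict): columns (keys) and values to be appended to xlsx_dict (dataset)
--         num_added_rows (int): number of empty "" cell rows, typically 1
--
--     Returns:
--         dict: dataset, subset of xlsx_dict
--     """
--     # num_added_rows > 1 only for adding in blank space after content, else one row at a time
--     is_first_row = True
--     for _ in range(num_added_rows):
--         add_spaces = list(dataset.keys())
--         if is_first_row:
--             for key in patch_obj:
--                 dataset[key].append(patch_obj[key])
--                 add_spaces.remove(key)
--             is_first_row = False
--         for unused_key in add_spaces:
--             dataset[unused_key].append("")
--     return dataset
-- ===== SOURCE B (Python) =====
-- def xlsx_patch_rows(dataset: dict, patch_obj: dict, num_added_rows: int) -> dict: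
--     """Column-major single pass: apply the patch values once, then extend every
--     column with all its remaining blank cells in one go."""
--     if num_added_rows > 0:
--         for key in patch_obj:
--             dataset[key].append(patch_obj[key])
--         blanks = [""] * (num_added_rows - 1)
--         blanks_full = [""] * num_added_rows
--         for key in dataset:
--             dataset[key].extend(blanks if key in patch_obj else blanks_full)
--     return dataset
-- ===== Notes on version B (the rewrite author's own statement) =====
-- stated objective: faster
-- what changed: Row-major repeated pass (rebuilding and scanning an add_spaces key list for each added row) replaced by a column-major single pass that applies the patch once and extends each column with all of its blank cells at once.
import Mathlib
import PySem

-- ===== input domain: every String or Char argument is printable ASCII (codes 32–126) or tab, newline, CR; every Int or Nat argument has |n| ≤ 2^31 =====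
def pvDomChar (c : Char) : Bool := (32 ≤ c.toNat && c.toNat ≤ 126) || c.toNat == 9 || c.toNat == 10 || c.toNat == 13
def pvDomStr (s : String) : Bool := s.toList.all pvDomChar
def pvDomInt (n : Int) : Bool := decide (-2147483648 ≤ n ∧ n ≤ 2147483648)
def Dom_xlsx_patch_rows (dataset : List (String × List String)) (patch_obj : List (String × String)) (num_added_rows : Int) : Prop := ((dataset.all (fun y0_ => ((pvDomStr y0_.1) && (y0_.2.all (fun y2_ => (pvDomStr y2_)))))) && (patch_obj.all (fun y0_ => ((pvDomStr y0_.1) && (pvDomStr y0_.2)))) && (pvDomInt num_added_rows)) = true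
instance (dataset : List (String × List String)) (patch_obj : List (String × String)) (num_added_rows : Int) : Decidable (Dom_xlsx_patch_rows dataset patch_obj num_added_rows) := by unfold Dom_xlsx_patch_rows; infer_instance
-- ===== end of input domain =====

-- B is a column-major single pass instead of A's row-major repeated pass; equivalence is about
-- the returned dict (both Pythons also mutate `dataset` in place, identically).

-- ===== PORT A =====
-- the body of A's `for _ in range(num_added_rows)` loop, on state (dataset, is_first_row)
def pvStepA (patch_obj : List (String × String))
    (st : PySem.Dict String (List String) × Bool) (_ : Int) :
    PySem.Dict String (List String) × Bool :=
  let add_spaces := st.1.keys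
  -- if is_first_row: append each patch value (KeyError excluded by Pre_) and remove its key
  let mid : PySem.Dict String (List String) × List String × Bool :=
    if st.2 then
      let p := patch_obj.foldl
        (fun (q : PySem.Dict String (List String) × List String) kv =>
          (q.1.modify kv.1 [] (fun col => col ++ [kv.2]),
           (PySem.List.remove? q.2 kv.1).getD q.2))
        (st.1, add_spaces)
      (p.1, p.2, false)
    else (st.1, add_spaces, st.2)
  (mid.2.1.foldl (fun d k => d.modify k [] (fun col => col ++ [""])) mid.1, mid.2.2)

def xlsx_patch_rows (dataset : List (String × List String)) (patch_obj : List (String × String)) (num_added_rows : Int) : List (String × List String) :=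
  ((PySem.List.pyRange 0 num_added_rows 1).foldl (pvStepA patch_obj)
    (PySem.Dict.mk dataset, true)).1.items

-- ===== PORT B =====
-- column-major: patch once, then extend every column with all its blanks at once
def xlsx_patch_rows_alt (dataset : List (String × List String)) (patch_obj : List (String × String)) (num_added_rows : Int) : List (String × List String) :=
  if 0 < num_added_rows then
    let d := patch_obj.foldl (fun d kv => d.modify kv.1 [] (fun col => col ++ [kv.2])) (PySem.Dict.mk dataset)
    let blanks := List.replicate (num_added_rows - 1).toNat ""
    let blanks_full := List.replicate num_added_rows.toNat ""
    (d.keys.foldl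
      (fun d k => d.modify k [] (fun col =>
        col ++ (if (PySem.Dict.mk patch_obj).contains k then blanks else blanks_full))) d).items
  else dataset

-- ===== PRECONDITION & SPEC =====
-- Pre_ requires distinct keys in each dict argument (automatic for a Python dict; an association
-- list with duplicate keys represents no Python input) and, when rows are added, every patch key
-- to be present in dataset — otherwise A raises KeyError at dataset[key].append (B raises too).
def Pre_xlsx_patch_rows (dataset : List (String × List String)) (patch_obj : List (String × String)) (num_added_rows : Int) : Prop :=
  (dataset.map Prod.fst).Nodup ∧ (patch_obj.map Prod.fst).Nodup ∧
  (0 < num_added_rows → ∀ p ∈ patch_obj, p.1 ∈ dataset.map Prod.fst)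
instance (dataset : List (String × List String)) (patch_obj : List (String × String)) (num_added_rows : Int) : Decidable (Pre_xlsx_patch_rows dataset patch_obj num_added_rows) := by unfold Pre_xlsx_patch_rows; infer_instance

def pvWitness_xlsx_patch_rows : (List (String × List String)) × (List (String × String)) × Int :=
  ([("a", ["1"]), ("b", ["2"])], [("a", "x")], 2)

def Spec_xlsx_patch_rows (dataset : List (String × List String)) (patch_obj : List (String × String)) (num_added_rows : Int) (out : List (String × List String)) : Prop := out = xlsx_patch_rows_alt dataset patch_obj num_added_rows
instance (dataset : List (String × List String)) (patch_obj : List (String × String)) (num_added_rows : Int) (out : List (String × List String)) : Decidable (Spec_xlsx_patch_rows dataset patch_obj num_added_rows out) := by unfold Spec_xlsx_patch_rows; infer_instance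

-- ===== CLAIM (what is proved, stated in full; the proofs are below) =====
def Claim_equal_xlsx_patch_rows : Prop := ∀ (dataset : List (String × List String)) (patch_obj : List (String × String)) (num_added_rows : Int), Dom_xlsx_patch_rows dataset patch_obj num_added_rows → Pre_xlsx_patch_rows dataset patch_obj num_added_rows → Spec_xlsx_patch_rows dataset patch_obj num_added_rows (xlsx_patch_rows dataset patch_obj num_added_rows)

-- ===== LEMMAS AND PROOFS =====

-- independent components of a pair-state foldl
theorem pv_foldl_pair {α β γ : Type} (l : List γ) (f : α → γ → α) (g : β → γ → β) :
    ∀ (a : α) (b : β),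
    l.foldl (fun q x => (f q.1 x, g q.2 x)) (a, b) = (l.foldl f a, l.foldl g b) := by
  induction l with
  | nil => intro a b; rfl
  | cons x xs ih => intro a b; simp only [List.foldl_cons]; exact ih _ _

-- getD after a modify-append fold over a Nodup key list
theorem pv_getD_modfold (h : String → List String) :
    ∀ (ks : List String) (d : PySem.Dict String (List String)) (c : String), ks.Nodup →
    (ks.foldl (fun d k => d.modify k [] (fun col => col ++ h k)) d).getD c []
      = d.getD c [] ++ (if c ∈ ks then h c else []) := by
  intro ks
  induction ks with
  | nil => intro d c _; simp
  | cons k ks ih =>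
    intro d c hnd
    simp only [List.foldl_cons]
    rw [ih _ c (List.Nodup.of_cons hnd)]
    rw [PySem.Dict.getD_modify]
    by_cases hck : c = k
    · subst hck
      have : c ∉ ks := (List.nodup_cons.mp hnd).1
      simp [this]
    · simp [hck, List.mem_cons]

-- keys after a modify-append fold over keys already present
theorem pv_keys_modfold (h : String → List String) :
    ∀ (ks : List String) (d : PySem.Dict String (List String)),
    (∀ k ∈ ks, k ∈ d.keys) →
    (ks.foldl (fun d k => d.modify k [] (fun col => col ++ h k)) d).keys = d.keys := by
  intro ks
  induction ks with
  | nil => intro d _; rfl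
  | cons k ks ih =>
    intro d hsub
    simp only [List.foldl_cons]
    have hk : k ∈ d.keys := hsub k (List.mem_cons_self)
    have hkeys : (d.modify k [] (fun col => col ++ h k)).keys = d.keys := by
      rw [PySem.Dict.keys_modify, PySem.Dict.keys_insert_of_contains]
      exact (PySem.Dict.contains_iff_mem_keys _ k).mpr hk
    rw [ih _ (by intro x hx; rw [hkeys]; exact hsub x (List.mem_cons_of_mem _ hx)), hkeys]

-- the add_spaces list after the first-row removal loop
theorem pv_removefold :
    ∀ (ks as : List String), ks.Nodup → as.Nodup → (∀ k ∈ ks, k ∈ as) →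
    ks.foldl (fun as k => (PySem.List.remove? as k).getD as) as
      = as.filter (fun a => decide (a ∉ ks)) := by
  intro ks
  induction ks with
  | nil => intro as _ _ _; simp
  | cons k ks ih =>
    intro as hksnd hasnd hsub
    simp only [List.foldl_cons]
    rw [PySem.List.remove?_eq_some_erase as k (hsub k List.mem_cons_self), Option.getD_some]
    rw [ih (as.erase k) (List.Nodup.of_cons hksnd) (hasnd.erase k)
        (by
          intro x hx
          have hxk : x ≠ k := by
            rintro rfl; exact (List.nodup_cons.mp hksnd).1 hx
          exact List.mem_erase_of_ne hxk |>.mpr (hsub x (List.mem_cons_of_mem _ hx)))]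
    rw [hasnd.erase_eq_filter k]
    rw [List.filter_filter]
    apply List.filter_congr
    intro a _
    by_cases hak : a = k
    · subst hak; simp
    · simp [hak, List.mem_cons]

-- the trailing (non-first) rows: each appends one "" to every column
theorem pv_tailrows (patch_obj : List (String × String)) :
    ∀ (l : List Int) (d : PySem.Dict String (List String)), d.keys.Nodup →
    ((l.foldl (pvStepA patch_obj) (d, false)).1.keys = d.keys ∧
     (l.foldl (pvStepA patch_obj) (d, false)).2 = false ∧
     ∀ c ∈ d.keys, (l.foldl (pvStepA patch_obj) (d, false)).1.getD c []
        = d.getD c [] ++ List.replicate l.length "") := by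
  intro l
  induction l with
  | nil => intro d hnd; refine ⟨rfl, rfl, ?_⟩; intro c _; simp
  | cons x xs ih =>
    intro d hnd
    have hstep : pvStepA patch_obj (d, false) x
        = (d.keys.foldl (fun d k => d.modify k [] (fun col => col ++ [""])) d, false) := by
      simp [pvStepA]
    have hkeys : (d.keys.foldl (fun d k => d.modify k [] (fun col => col ++ [""])) d).keys
        = d.keys := pv_keys_modfold _ d.keys d (by intro k hk; exact hk)
    have hnd' : (d.keys.foldl (fun d k => d.modify k [] (fun col => col ++ [""])) d).keys.Nodup := by
      rw [hkeys]; exact hnd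
    obtain ⟨ihk, ihb, ihg⟩ := ih _ hnd'
    simp only [List.foldl_cons, hstep]
    refine ⟨by rw [ihk, hkeys], ihb, ?_⟩
    intro c hc
    rw [ihg c (by rw [hkeys]; exact hc)]
    rw [pv_getD_modfold (fun _ => [""]) d.keys d c hnd]
    simp [hc, List.replicate_succ, List.append_assoc]

-- Set.update by elements already present is the identity
theorem pv_update_of_subset (s xs : List String) (h : ∀ x ∈ xs, x ∈ s) :
    PySem.Set.update s xs = s := by
  rw [PySem.Set.update_eq_append_filter]
  have : (PySem.Set.ofList xs).filter (fun y => !(PySem.Set.contains s y)) = [] := by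
    apply List.filter_eq_nil_iff.mpr
    intro y hy
    have hys : y ∈ s := h y ((PySem.List.mem_dedup xs y).mp hy)
    simp
    exact hys
  rw [this, List.append_nil]

-- ===== VERDICT (by name: the statement is the Claim_ definition above) =====
theorem xlsx_patch_rows_spec : Claim_equal_xlsx_patch_rows := by
  intro ds po n _hdom hpre
  obtain ⟨hK, hP, hsub⟩ := hpre
  unfold Spec_xlsx_patch_rows xlsx_patch_rows xlsx_patch_rows_alt
  by_cases hn : 0 < n
  · rw [PySem.List.pyRange_one_cons hn]
    simp only [List.foldl_cons, if_pos hn]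
    have hsub' : ∀ k ∈ po.map Prod.fst, k ∈ ds.map Prod.fst := by
      intro k hk
      obtain ⟨p, hp, rfl⟩ := List.mem_map.mp hk
      exact hsub hn p hp
    have hKm : (({ items := ds } : PySem.Dict String (List String))).keys = ds.map Prod.fst := rfl
    set P := List.foldl (fun d kv => d.modify kv.1 [] fun col => col ++ [kv.2]) ({ items := ds } : PySem.Dict String (List String)) po with hPdef
    set R := List.filter (fun a => decide (a ∉ List.map Prod.fst po)) (List.map Prod.fst ds) with hRdef
    set Q := List.foldl (fun d k => d.modify k [] fun col => col ++ [""]) P R with hQdef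
    have hstep1 : pvStepA po (({ items := ds } : PySem.Dict String (List String)), true) 0 = (Q, false) := by
      simp only [pvStepA, if_true]
      rw [pv_foldl_pair po (fun d (kv : String × String) => d.modify kv.1 [] fun col => col ++ [kv.2])
            (fun as (kv : String × String) => (PySem.List.remove? as kv.1).getD as)
            ({ items := ds } : PySem.Dict String (List String)) (({ items := ds } : PySem.Dict String (List String))).keys]
      rw [← List.foldl_map (f := Prod.fst) (g := fun as k => (PySem.List.remove? as k).getD as)]
      rw [hKm, pv_removefold _ _ hP hK hsub']
    rw [hstep1]
    have hkeysP : P.keys = ds.map Prod.fst := by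
      rw [hPdef, PySem.Dict.keys_foldl_modify_key po (fun kv => kv.1) [] (fun _ kv => (fun col => col ++ [kv.2]))]
      rw [hKm]
      exact pv_update_of_subset _ _ hsub'
    have hndP : P.keys.Nodup := by rw [hkeysP]; exact hK
    have hRsub : ∀ k ∈ R, k ∈ P.keys := by
      rw [hkeysP, hRdef]; intro k hk; exact (List.mem_filter.mp hk).1
    have hRnd : R.Nodup := hK.filter _
    have hkeysQ : Q.keys = ds.map Prod.fst := by
      rw [hQdef, pv_keys_modfold (fun _ => [""]) R P hRsub, hkeysP]
    have hndQ : Q.keys.Nodup := by rw [hkeysQ]; exact hK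
    obtain ⟨hkA, _hbA, hgA⟩ := pv_tailrows po (PySem.List.pyRange (0+1) n) Q hndQ
    rw [hkeysP]
    have hsubK : ∀ k ∈ ds.map Prod.fst, k ∈ P.keys := by
      rw [hkeysP]; intro k hk; exact hk
    have hkeysB : (List.foldl (fun d k => d.modify k [] fun col => col ++ (if ({ items := po } : PySem.Dict String String).contains k then List.replicate (n-1).toNat "" else List.replicate n.toNat "")) P (ds.map Prod.fst)).keys = ds.map Prod.fst := by
      rw [pv_keys_modfold (fun k => if ({ items := po } : PySem.Dict String String).contains k then List.replicate (n-1).toNat "" else List.replicate n.toNat "") (ds.map Prod.fst) P hsubK, hkeysP]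
    rw [PySem.Dict.items_eq_map_keys _ (by rw [hkA, hkeysQ]; exact hK) [],
        PySem.Dict.items_eq_map_keys _ (by rw [hkeysB]; exact hK) []]
    rw [hkA, hkeysQ, hkeysB]
    apply List.map_congr_left
    intro c hc
    apply congrArg (Prod.mk c)
    rw [hgA c (by rw [hkeysQ]; exact hc)]
    rw [pv_getD_modfold (fun k => if ({ items := po } : PySem.Dict String String).contains k then List.replicate (n-1).toNat "" else List.replicate n.toNat "") (ds.map Prod.fst) P c hK]
    rw [hQdef, pv_getD_modfold (fun _ => [""]) R P c hRnd]
    have hlen : (PySem.List.pyRange (0+1) n).length = (n-1).toNat := by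
      rw [PySem.List.length_pyRange_one]; norm_num
    rw [hlen]
    have hcont : ({ items := po } : PySem.Dict String String).contains c
        = decide (c ∈ po.map Prod.fst) := by
      rw [PySem.Dict.contains_eq_decide_mem_keys]; rfl
    by_cases hcp : c ∈ po.map Prod.fst
    · have hcR : c ∉ R := by
        rw [hRdef]
        simp only [List.mem_filter, decide_eq_true_eq]
        exact fun h => h.2 hcp
      simp [hcR, hc, hcont, hcp]
    · have hcR : c ∈ R := by
        rw [hRdef]; exact List.mem_filter.mpr ⟨hc, by simpa using hcp⟩
      have hnn : n.toNat = (n-1).toNat + 1 := by omega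
      simp only [hcR, hc, hcont, hcp, if_true, decide_false]
      rw [hnn, List.replicate_succ]
      simp [List.append_assoc]
  · rw [PySem.List.pyRange_one_eq_nil (by omega)]
    simp [hn]
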